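-- pv_equiv track=rewrite | github.com/Vergil0327/leetcode-history | Bit Manipulation/3878. Count Good Subarrays/solution.py | countGoodSubarrays
-- ===== SOURCE A (Python) =====
-- def countGoodSubarrays(nums: list[int]) -> int:
--     n = len(nums)
--     last_pos = {}  # Tracks the last index of every number seen so far
--     # List of [or_value, leftmost_index_with_this_or]
--     # ordered from right-to-left (j down to 0)
--     dp = []
--     total_good = 0
--
--     for j in range(n):
--         val = nums[j]
--         last_pos[val] = j
--
--         # 1. Update OR intervals for the new element at j
--         next_dp = [[val, j]]
--         for or_val, start_idx in dp:
--             new_or = or_val | val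
--             if new_or == next_dp[-1][0]:
--                 # Keep the leftmost start_idx for the same OR value
--                 next_dp[-1][1] = start_idx
--             else:
--                 next_dp.append([new_or, start_idx])
--         dp = next_dp
--
--         # 2. Count start positions 'i' that make a good subarray ending at j
--         # Each element in dp is [OR_value, start_idx]
--         # It represents an interval of i: [dp[k][1], dp[k-1][1]-1]
--         for k in range(len(dp)):
--             current_or = dp[k][0]
--             left_bound = dp[k][1]
--             right_bound = dp[k-1][1] - 1 if k > 0 else j
--
--             # Check if 'current_or' exists in nums[i...j]
--             # If its last occurrence is >= i, then nums[i...j] is Good.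
--             if current_or in last_pos:
--                 pos = last_pos[current_or]
--                 # We need start_idx 'i' such that:
--                 # left_bound <= i <= right_bound AND i <= pos
--                 if pos >= left_bound:
--                     valid_end = min(right_bound, pos)
--                     total_good += (valid_end - left_bound + 1)
--
--     return total_good
-- ===== SOURCE B (Python) =====
-- def countGoodSubarrays(nums: list[int]) -> int:
--     n = len(nums)
--     total = 0
--     for i in range(n):
--         or_val = 0
--         seen = set()
--         for j in range(i, n):
--             or_val |= nums[j]
--             seen.add(nums[j])
--             if or_val in seen:
--                 total += 1
--     return total
-- ===== Notes on version B (the rewrite author's own statement) =====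
-- stated objective: simpler
-- what changed: Replaces A's OR-interval DP (a dp list of [or_value, leftmost_index] intervals merged per step plus a last-occurrence dict and per-interval range arithmetic) with the naive double loop that, for each start index, keeps a running OR and a set of seen elements and counts a subarray when the OR is in the set.
import Mathlib
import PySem

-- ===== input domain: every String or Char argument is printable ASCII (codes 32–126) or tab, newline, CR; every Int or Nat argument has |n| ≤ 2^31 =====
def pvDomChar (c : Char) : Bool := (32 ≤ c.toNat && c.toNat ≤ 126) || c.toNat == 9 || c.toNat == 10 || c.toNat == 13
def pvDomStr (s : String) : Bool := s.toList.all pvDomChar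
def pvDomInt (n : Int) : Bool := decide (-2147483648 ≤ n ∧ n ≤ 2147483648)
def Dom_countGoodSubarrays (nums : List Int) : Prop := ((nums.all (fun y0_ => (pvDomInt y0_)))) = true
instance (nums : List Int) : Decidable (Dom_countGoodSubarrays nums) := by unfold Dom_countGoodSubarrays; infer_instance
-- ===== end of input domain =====

-- B replaces A's OR-interval DP (dp of [or, leftmost_index] plus last-occurrence dict) by the
-- naive two-loop scan keeping only a running OR and the set of elements of the current subarray;
-- objective: simpler (B is quadratic, A is near-linear — B trades speed for clarity).

-- ===== PORT A =====
def countGoodSubarrays (nums : List Int) : Int :=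
  let n : Int := PySem.List.len nums
  let st :=
    (PySem.List.pyRange 0 n 1).foldl
      (fun (st : PySem.Dict Int Int × List (Int × Int) × Int) j =>
        let last_pos := st.1
        let dp := st.2.1
        let total_good := st.2.2
        let val := PySem.List.pyGetD nums j 0
        let last_pos := last_pos.insert val j
        -- Python appends to next_dp and mutates its last element; kept as a reversed accumulator
        let rdp :=
          dp.foldl
            (fun acc p =>
              let new_or := PySem.Int.bor p.1 val
              match acc with
              | (o, s) :: rest =>
                if new_or = o then (o, p.2) :: rest
                else (new_or, p.2) :: (o, s) :: rest
              | [] => [(new_or, p.2)])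
            [(val, j)]
        let dp := rdp.reverse
        let total_good :=
          (PySem.List.pyRange 0 (PySem.List.len dp) 1).foldl
            (fun tg k =>
              let e := PySem.List.pyGetD dp k (0, 0)
              let current_or := e.1
              let left_bound := e.2
              let right_bound := if 0 < k then (PySem.List.pyGetD dp (k - 1) (0, 0)).2 - 1 else j
              match last_pos.get? current_or with
              | some pos =>
                  if left_bound ≤ pos then tg + (min right_bound pos - left_bound + 1) else tg
              | none => tg)
            total_good
        (last_pos, dp, total_good))
      (PySem.Dict.empty, [], 0)
  st.2.2

-- ===== PORT B =====
def countGoodSubarrays_alt (nums : List Int) : Int :=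
  let n : Int := PySem.List.len nums
  (PySem.List.pyRange 0 n 1).foldl
    (fun total i =>
      let st :=
        (PySem.List.pyRange i n 1).foldl
          (fun (st : Int × PySem.Set Int × Int) j =>
            let or_val := PySem.Int.bor st.1 (PySem.List.pyGetD nums j 0)
            let seen := PySem.Set.add st.2.1 (PySem.List.pyGetD nums j 0)
            let t := if PySem.Set.contains seen or_val then st.2.2 + 1 else st.2.2
            (or_val, seen, t))
          (0, PySem.Set.empty, total)
      st.2.2)
    0

-- ===== PRECONDITION & SPEC =====
def Spec_countGoodSubarrays (nums : List Int) (out : Int) : Prop := out = countGoodSubarrays_alt nums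
instance (nums : List Int) (out : Int) : Decidable (Spec_countGoodSubarrays nums out) := by unfold Spec_countGoodSubarrays; infer_instance

-- ===== CLAIM (what is proved, stated in full; the proofs are below) =====
def Claim_equal_countGoodSubarrays : Prop := ∀ (nums : List Int), Dom_countGoodSubarrays nums → Spec_countGoodSubarrays nums (countGoodSubarrays nums)

-- ===== LEMMAS AND PROOFS =====

-- `nums[i]` as a total function (indices out of range never matter below)
def pvA (nums : List Int) (i : Nat) : Int := nums.getD i 0

-- OR of nums[i .. i+k-1]
def orSeg (nums : List Int) (i k : Nat) : Int :=
  (List.range' i k).foldl (fun acc p => PySem.Int.bor acc (pvA nums p)) 0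

-- the elements nums[i .. i+k-1]
def elemsSeg (nums : List Int) (i k : Nat) : List Int := (List.range' i k).map (pvA nums)

-- "the subarray nums[i..e] is good"
def goodAt (nums : List Int) (i e : Nat) : Bool :=
  decide (orSeg nums i (e + 1 - i) ∈ elemsSeg nums i (e + 1 - i))

-- number of good subarrays ending at e
def cntA (nums : List Int) (e : Nat) : Nat := (List.range (e + 1)).countP (fun i => goodAt nums i e)

-- number of good subarrays starting at i (inside nums[0..n-1])
def cntB (nums : List Int) (n i : Nat) : Nat :=
  (List.range (n - i)).countP (fun t => goodAt nums i (i + t))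

-- last index < m holding value v (the content of A's last_pos dict)
def lastOcc (nums : List Int) : Nat → Int → Option Int
  | 0, _ => none
  | m + 1, v => if pvA nums m = v then some (m : Int) else lastOcc nums m v

-- the segment structure of A's dp list: head segment covers [sN..hi], the tail covers [lo..sN-1],
-- and on each segment the stored OR value is the OR of nums[i..e] (f i), e being implicit in f
def Segsb (f : Nat → Int) (lo : Nat) : List (Int × Int) → Nat → Prop
  | [], _ => False
  | (o, s) :: rest, hi =>
      if rest.isEmpty then s = (lo : Int) ∧ lo ≤ hi ∧ ∀ i, lo ≤ i → i ≤ hi → f i = o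
      else ∃ sN : Nat, s = (sN : Int) ∧ lo < sN ∧ sN ≤ hi ∧
        (∀ i, sN ≤ i → i ≤ hi → f i = o) ∧ Segsb f lo rest (sN - 1)

def fAt (nums : List Int) (e i : Nat) : Int := orSeg nums i (e + 1 - i)

-- A's inner dp-merging fold, named
def mergeStep (val : Int) (acc : List (Int × Int)) (p : Int × Int) : List (Int × Int) :=
  let new_or := PySem.Int.bor p.1 val
  match acc with
  | (o, s) :: rest =>
    if new_or = o then (o, p.2) :: rest
    else (new_or, p.2) :: (o, s) :: rest
  | [] => [(new_or, p.2)]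

-- A's counting fold, named
def countLoop (lp : PySem.Dict Int Int) (dp : List (Int × Int)) (rb tg : Int) : Int :=
  (PySem.List.pyRange 0 (PySem.List.len dp) 1).foldl
    (fun tg k =>
      let e := PySem.List.pyGetD dp k (0, 0)
      let current_or := e.1
      let left_bound := e.2
      let right_bound := if 0 < k then (PySem.List.pyGetD dp (k - 1) (0, 0)).2 - 1 else rb
      match lp.get? current_or with
      | some pos =>
          if left_bound ≤ pos then tg + (min right_bound pos - left_bound + 1) else tg
      | none => tg)
    tg

-- what one dp entry contributes in the counting loop
def contrib (lp : PySem.Dict Int Int) (o s rb : Int) : Int :=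
  match lp.get? o with
  | some pos => if s ≤ pos then min rb pos - s + 1 else 0
  | none => 0

def contribs (lp : PySem.Dict Int Int) : List (Int × Int) → Int → List Int
  | [], _ => []
  | (o, s) :: rest, rb => contrib lp o s rb :: contribs lp rest (s - 1)

-- A's whole loop body, named
def stepA (nums : List Int) (st : PySem.Dict Int Int × List (Int × Int) × Int) (j : Int) :
    PySem.Dict Int Int × List (Int × Int) × Int :=
  let val := PySem.List.pyGetD nums j 0
  let lp := st.1.insert val j
  let dp := (st.2.1.foldl (mergeStep val) [(val, j)]).reverse
  (lp, dp, countLoop lp dp j st.2.2)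

def AState (nums : List Int) (m : Nat) : PySem.Dict Int Int × List (Int × Int) × Int :=
  (PySem.List.pyRange 0 (m : Int) 1).foldl (stepA nums) (PySem.Dict.empty, [], 0)

-- B's loop bodies, named
def stepBIn (nums : List Int) (st : Int × PySem.Set Int × Int) (j : Int) : Int × PySem.Set Int × Int :=
  let or_val := PySem.Int.bor st.1 (PySem.List.pyGetD nums j 0)
  let seen := PySem.Set.add st.2.1 (PySem.List.pyGetD nums j 0)
  let t := if PySem.Set.contains seen or_val then st.2.2 + 1 else st.2.2
  (or_val, seen, t)

def rowB (nums : List Int) (n : Int) (total i : Int) : Int :=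
  ((PySem.List.pyRange i n 1).foldl (stepBIn nums) (0, PySem.Set.empty, total)).2.2

theorem port_eq (nums : List Int) : countGoodSubarrays nums = (AState nums nums.length).2.2 := rfl

theorem port_eq_alt (nums : List Int) :
    countGoodSubarrays_alt nums =
      (PySem.List.pyRange 0 (nums.length : Int) 1).foldl (rowB nums (nums.length : Int)) 0 := rfl

theorem zero_bor (a : Int) : PySem.Int.bor 0 a = a := by
  rw [PySem.Int.bor_comm]; exact PySem.Int.bor_zero a

theorem orSeg_concat (nums : List Int) (i k : Nat) :
    orSeg nums i (k + 1) = PySem.Int.bor (orSeg nums i k) (pvA nums (i + k)) := by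
  unfold orSeg
  rw [List.range'_1_concat, List.foldl_append]
  rfl

theorem elemsSeg_concat (nums : List Int) (i k : Nat) :
    elemsSeg nums i (k + 1) = elemsSeg nums i k ++ [pvA nums (i + k)] := by
  unfold elemsSeg
  rw [List.range'_1_concat, List.map_append]
  rfl

theorem fAt_succ (nums : List Int) (m i : Nat) (h : i < m) :
    fAt nums m i = PySem.Int.bor (fAt nums (m - 1) i) (pvA nums m) := by
  unfold fAt
  have h1 : m + 1 - i = (m - i) + 1 := by omega
  have h2 : m - 1 + 1 - i = m - i := by omega
  rw [h1, h2, orSeg_concat]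
  have h3 : i + (m - i) = m := by omega
  rw [h3]

theorem fAt_self (nums : List Int) (m : Nat) : fAt nums m m = pvA nums m := by
  unfold fAt
  have h1 : m + 1 - m = 1 := by omega
  rw [h1]
  show PySem.Int.bor 0 (pvA nums m) = pvA nums m
  exact zero_bor _

theorem lastOcc_none (nums : List Int) (m : Nat) (v : Int) (h : lastOcc nums m v = none) :
    ∀ q, q < m → pvA nums q ≠ v := by
  induction m with
  | zero => intro q hq; omega
  | succ m ih =>
    rw [lastOcc] at h
    split at h
    · exact absurd h (by simp)
    · intro q hq
      rcases Nat.lt_succ_iff_lt_or_eq.mp hq with h' | h'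
      · exact ih h q h'
      · subst h'; assumption

theorem lastOcc_some (nums : List Int) (m : Nat) (v p : Int) (h : lastOcc nums m v = some p) :
    ∃ pN : Nat, p = (pN : Int) ∧ pN < m ∧ pvA nums pN = v ∧
      ∀ q, q < m → pvA nums q = v → q ≤ pN := by
  induction m with
  | zero => simp [lastOcc] at h
  | succ m ih =>
    rw [lastOcc] at h
    split at h
    · refine ⟨m, by simpa using h.symm, by omega, by assumption, fun q hq _ => by omega⟩
    · obtain ⟨pN, h1, h2, h3, h4⟩ := ih h
      refine ⟨pN, h1, by omega, h3, fun q hq hv => ?_⟩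
      rcases Nat.lt_succ_iff_lt_or_eq.mp hq with h' | h'
      · exact h4 q h' hv
      · subst h'; exact absurd hv (by assumption)

-- counting i ≤ p in an interval
theorem countP_le (p : Nat) : ∀ (len a : Nat),
    (List.range' a len).countP (fun i => decide (i ≤ p)) = min len (p + 1 - a) := by
  intro len
  induction len with
  | zero => simp
  | succ len ih =>
    intro a
    rw [List.range'_succ, List.countP_cons, ih]
    by_cases h : a ≤ p <;> simp [h] <;> omega

theorem countP_range_eq (m : Nat) (q : Nat → Bool) :
    (List.range m).countP q = ∑ i ∈ Finset.range m, (if q i then 1 else 0) := by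
  induction m with
  | zero => simp
  | succ m ih =>
    rw [List.range_succ, List.countP_append, Finset.sum_range_succ, ih]
    simp [List.countP_cons]

-- one dp entry contributes exactly the number of good start indices in its segment
theorem seg_contrib (nums : List Int) (lp : PySem.Dict Int Int) (e : Nat)
    (hlp : ∀ v, lp.get? v = lastOcc nums (e + 1) v)
    (o : Int) (sN hi : Nat) (hcov : ∀ i, sN ≤ i → i ≤ hi → fAt nums e i = o)
    (hsn : sN ≤ hi) (hhi : hi ≤ e) :
    contrib lp o (sN : Int) (hi : Int) =
      ((List.range' sN (hi + 1 - sN)).countP (fun i => goodAt nums i e) : Int) := by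
  have hiq : ∀ i, sN ≤ i → i ≤ hi → (goodAt nums i e = true ↔ ∃ q, i ≤ q ∧ q ≤ e ∧ pvA nums q = o) := by
    intro i h1 h2
    have hor : orSeg nums i (e + 1 - i) = o := hcov i h1 h2
    simp only [goodAt, elemsSeg, decide_eq_true_eq, List.mem_map, List.mem_range'_1, hor]
    constructor
    · rintro ⟨q, ⟨hq1, hq2⟩, hq3⟩
      exact ⟨q, hq1, by omega, hq3⟩
    · rintro ⟨q, hq1, hq2, hq3⟩
      exact ⟨q, ⟨hq1, by omega⟩, hq3⟩
  unfold contrib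
  rw [hlp o]
  cases h : lastOcc nums (e + 1) o with
  | none =>
    have hz : (List.range' sN (hi + 1 - sN)).countP (fun i => goodAt nums i e) = 0 := by
      rw [List.countP_eq_zero]
      intro i hi'
      rw [List.mem_range'_1] at hi'
      intro hgood
      obtain ⟨q, hq1, hq2, hq3⟩ := (hiq i (by omega) (by omega)).mp hgood
      exact lastOcc_none nums (e + 1) o h q (by omega) hq3
    rw [hz]
    rfl
  | some p =>
    obtain ⟨pN, rfl, hlt, hval, hmax⟩ := lastOcc_some nums (e + 1) o p h
    have hcong : (List.range' sN (hi + 1 - sN)).countP (fun i => goodAt nums i e)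
        = (List.range' sN (hi + 1 - sN)).countP (fun i => decide (i ≤ pN)) := by
      apply List.countP_congr
      intro i hi'
      rw [List.mem_range'_1] at hi'
      have h1 : sN ≤ i := by omega
      have h2 : i ≤ hi := by omega
      by_cases hip : i ≤ pN
      · have : goodAt nums i e = true := (hiq i h1 h2).mpr ⟨pN, hip, by omega, hval⟩
        simp [this, hip]
      · have : ¬ goodAt nums i e = true := by
          intro hg
          obtain ⟨q, hq1, hq2, hq3⟩ := (hiq i h1 h2).mp hg
          exact hip (le_trans hq1 (hmax q (by omega) hq3))
        simp only [Bool.not_eq_true] at this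
        simp [this, hip]
    rw [hcong, countP_le]
    show (if (sN : Int) ≤ (pN : Int) then min (hi : Int) (pN : Int) - (sN : Int) + 1 else 0)
        = ((min (hi + 1 - sN) (pN + 1 - sN) : Nat) : Int)
    split <;> omega

theorem segs_count (nums : List Int) (lp : PySem.Dict Int Int) (e : Nat)
    (hlp : ∀ v, lp.get? v = lastOcc nums (e + 1) v) :
    ∀ (dp : List (Int × Int)) (lo hi : Nat), Segsb (fAt nums e) lo dp hi → hi ≤ e →
      (contribs lp dp (hi : Int)).sum =
        ((List.range' lo (hi + 1 - lo)).countP (fun i => goodAt nums i e) : Int) := by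
  intro dp
  induction dp with
  | nil => intro lo hi hseg _; exact absurd hseg (by simp [Segsb])
  | cons head rest ih =>
    intro lo hi hseg hhi
    obtain ⟨o, s⟩ := head
    cases rest with
    | nil =>
      obtain ⟨hs, hlo, hcov⟩ := hseg
      subst hs
      simp only [contribs, List.sum_cons, List.sum_nil, add_zero]
      exact seg_contrib nums lp e hlp o lo hi hcov hlo hhi
    | cons p rest' =>
      obtain ⟨sN, hs, hlosn, hsnhi, hcov, hrec⟩ := hseg
      subst hs
      have h1 : ((sN : Int) - 1) = ((sN - 1 : Nat) : Int) := by omega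
      rw [show contribs lp ((o, (sN : Int)) :: p :: rest') (hi : Int)
          = contrib lp o (sN : Int) (hi : Int) :: contribs lp (p :: rest') ((sN : Int) - 1) from rfl]
      rw [List.sum_cons, h1, ih lo (sN - 1) hrec (by omega),
        seg_contrib nums lp e hlp o sN hi hcov hsnhi hhi]
      have hsplit : List.range' lo (hi + 1 - lo)
          = List.range' lo (sN - lo) ++ List.range' sN (hi + 1 - sN) := by
        have : List.range' lo (sN - lo) ++ List.range' (lo + (sN - lo)) (hi + 1 - sN)
            = List.range' lo ((sN - lo) + (hi + 1 - sN)) := List.range'_append_1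
        rw [show lo + (sN - lo) = sN by omega] at this
        rw [show hi + 1 - lo = (sN - lo) + (hi + 1 - sN) by omega, ← this]
      rw [hsplit, List.countP_append]
      have h2 : sN - 1 + 1 - lo = sN - lo := by omega
      rw [h2]
      push_cast
      ring

theorem countLoop_nil (lp : PySem.Dict Int Int) (rb tg : Int) : countLoop lp [] rb tg = tg := by
  unfold countLoop
  rw [show PySem.List.len ([] : List (Int × Int)) = 0 from rfl,
    PySem.List.pyRange_one_eq_nil le_rfl]
  rfl

theorem countLoop_cons (lp : PySem.Dict Int Int) (o s : Int) (rest : List (Int × Int)) (rb tg : Int) :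
    countLoop lp ((o, s) :: rest) rb tg = countLoop lp rest (s - 1) (tg + contrib lp o s rb) := by
  unfold countLoop
  have hlen : PySem.List.len ((o, s) :: rest) = ((rest.length + 1 : Nat) : Int) := by
    simp [PySem.List.len_eq]
  have hlen2 : PySem.List.len rest = ((rest.length : Nat) : Int) := by
    simp [PySem.List.len_eq]
  rw [hlen, hlen2, PySem.List.pyRange_zero_nat, PySem.List.pyRange_zero_nat,
    List.range_succ_eq_map, List.map_cons, List.map_map, List.foldl_cons, List.foldl_map,
    List.foldl_map]
  have hfirst : ∀ tg' : Int,
      (let e := PySem.List.pyGetD ((o, s) :: rest) ((0 : Nat) : Int) ((0 : Int), (0 : Int))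
       let current_or := e.1
       let left_bound := e.2
       let right_bound := if 0 < ((0 : Nat) : Int) then
           (PySem.List.pyGetD ((o, s) :: rest) (((0 : Nat) : Int) - 1) (0, 0)).2 - 1 else rb
       match lp.get? current_or with
       | some pos =>
           if left_bound ≤ pos then tg' + (min right_bound pos - left_bound + 1) else tg'
       | none => tg') = tg' + contrib lp o s rb := by
    intro tg'
    simp only [Nat.cast_zero, PySem.List.pyGetD_zero_cons, lt_irrefl, if_false]
    unfold contrib
    cases lp.get? o with
    | none => simp
    | some pos => by_cases hsp : s ≤ pos <;> simp [hsp]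
  rw [hfirst tg]
  apply List.foldl_ext
  intro acc k hk
  simp only [Function.comp, Nat.succ_eq_add_one, Nat.cast_add, Nat.cast_one]
  have h1 : PySem.List.pyGetD ((o, s) :: rest) ((k : Int) + 1) ((0:Int), (0:Int)) =
      PySem.List.pyGetD rest (k : Int) (0, 0) := by
    rw [show ((k : Int) + 1) = ((k + 1 : Nat) : Int) by push_cast; ring]
    rw [PySem.List.pyGetD_natCast, PySem.List.pyGetD_natCast]
    rfl
  have h2 : (0 : Int) < (k : Int) + 1 := by positivity
  have h3 : ((k : Int) + 1 - 1) = (k : Int) := by ring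
  rw [h1]
  simp only [if_pos h2, h3]
  have h4 : (if 0 < (k : Int) then (PySem.List.pyGetD rest ((k:Int) - 1) ((0:Int), (0:Int))).2 - 1 else s - 1)
      = (PySem.List.pyGetD ((o, s) :: rest) (k : Int) ((0:Int), (0:Int))).2 - 1 := by
    cases k with
    | zero => simp only [Nat.cast_zero, lt_irrefl, if_false, PySem.List.pyGetD_zero_cons]
    | succ k' =>
      have h5 : (0 : Int) < ((k' + 1 : Nat) : Int) := by positivity
      simp only [if_pos h5]
      rw [show (((k' + 1 : Nat) : Int) - 1) = ((k' : Nat) : Int) by push_cast; ring]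
      rw [PySem.List.pyGetD_natCast, PySem.List.pyGetD_natCast]
      rfl
  rw [h4]

theorem countLoop_eq (lp : PySem.Dict Int Int) :
    ∀ (dp : List (Int × Int)) (rb tg : Int), countLoop lp dp rb tg = tg + (contribs lp dp rb).sum := by
  intro dp
  induction dp with
  | nil => intro rb tg; rw [countLoop_nil]; simp [contribs]
  | cons p rest ih =>
    intro rb tg
    obtain ⟨o, s⟩ := p
    rw [countLoop_cons, ih, contribs]
    simp [add_assoc]

-- the dp list always ends with a segment whose stored start is the bottom bound
theorem segsb_getLast (f : Nat → Int) :
    ∀ (L : List (Int × Int)) (lo hi : Nat), Segsb f lo L hi →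
      ∃ o, L.getLast? = some (o, (lo : Int)) := by
  intro L
  induction L with
  | nil => intro lo hi h; exact absurd h (by simp [Segsb])
  | cons head rest ih =>
    intro lo hi h
    obtain ⟨o, s⟩ := head
    cases rest with
    | nil =>
      obtain ⟨hs, -, -⟩ := h
      exact ⟨o, by simp [hs]⟩
    | cons p rest' =>
      obtain ⟨sN, -, -, -, -, hrec⟩ := h
      obtain ⟨o', ho'⟩ := ih lo (sN - 1) hrec
      exact ⟨o', by rw [List.getLast?_cons_cons]; exact ho'⟩

-- lowering the start of the last (bottom) segment
theorem segsb_extend_last (f : Nat → Int) :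
    ∀ (X : List (Int × Int)) (o sh : Int) (T lo' sN : Nat),
      Segsb f lo' (X ++ [(o, sh)]) T → sN ≤ lo' → (∀ i, sN ≤ i → i < lo' → f i = o) →
      Segsb f sN (X ++ [(o, (sN : Int))]) T := by
  intro X
  induction X with
  | nil =>
    intro o sh T lo' sN h hle hcov
    obtain ⟨hs, hlo, hcov'⟩ := h
    refine ⟨rfl, by omega, fun i h1 h2 => ?_⟩
    by_cases hi : i < lo'
    · exact hcov i h1 hi
    · exact hcov' i (by omega) h2
  | cons x X' ih =>
    intro o sh T lo' sN h hle hcov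
    obtain ⟨ox, sx⟩ := x
    rw [List.cons_append] at h ⊢
    have hne : ((X' ++ [(o, sh)]).isEmpty) = false := by simp
    have hne2 : ((X' ++ [(o, (sN : Int))]).isEmpty) = false := by simp
    rw [Segsb, hne2, if_neg (by simp)]
    rw [Segsb, hne, if_neg (by simp)] at h
    obtain ⟨sN', hs, hlo, hhi, hcovx, hrec⟩ := h
    exact ⟨sN', hs, by omega, hhi, hcovx, ih o sh (sN' - 1) lo' sN hrec hle hcov⟩

-- appending a new bottom segment
theorem segsb_append (f : Nat → Int) :
    ∀ (X : List (Int × Int)) (o : Int) (T lo' sN : Nat),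
      Segsb f lo' X T → sN < lo' → (∀ i, sN ≤ i → i < lo' → f i = o) →
      Segsb f sN (X ++ [(o, (sN : Int))]) T := by
  intro X
  induction X with
  | nil => intro o T lo' sN h; exact absurd h (by simp [Segsb])
  | cons x X' ih =>
    intro o T lo' sN h hlt hcov
    obtain ⟨ox, sx⟩ := x
    rw [List.cons_append]
    cases X' with
    | nil =>
      obtain ⟨hs, hlo, hcov'⟩ := h
      refine ⟨lo', hs, hlt, hlo, hcov', ?_⟩
      refine ⟨rfl, by omega, fun i h1 h2 => hcov i h1 (by omega)⟩
    | cons p X'' =>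
      obtain ⟨sN', hs, hlo, hhi, hcovx, hrec⟩ := h
      exact ⟨sN', hs, by omega, hhi, hcovx, ih o (sN' - 1) lo' sN hrec hlt hcov⟩

-- the dp-merging fold preserves the segment structure, with ORs updated by the new element
theorem mergeFold (f g : Nat → Int) (val : Int) (E : Nat)
    (hg : ∀ i, i < E → g i = PySem.Int.bor (f i) val) :
    ∀ (dpOld : List (Int × Int)) (lo hi : Nat) (acc : List (Int × Int)),
      Segsb f lo dpOld hi → hi < E → Segsb g (hi + 1) acc.reverse E →
      Segsb g lo ((dpOld.foldl (mergeStep val) acc).reverse) E := by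
  intro dpOld
  induction dpOld with
  | nil => intro lo hi acc h; exact absurd h (by simp [Segsb])
  | cons hd rest ih =>
    intro lo hi acc h hE hacc
    obtain ⟨o, s⟩ := hd
    -- the head of acc is the bottom segment of acc.reverse, starting at hi+1
    obtain ⟨oh, hlast⟩ := segsb_getLast g acc.reverse (hi + 1) E hacc
    rw [List.getLast?_reverse] at hlast
    obtain ⟨t, hacc_eq⟩ : ∃ t, acc = (oh, ((hi + 1 : Nat) : Int)) :: t := by
      cases acc with
      | nil => simp at hlast
      | cons a t => exact ⟨t, by simp at hlast; subst hlast; push_cast; rfl⟩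
    subst hacc_eq
    -- extract the structure of the head segment of the old dp
    have hstep : ∃ sN : Nat, s = (sN : Int) ∧ lo ≤ sN ∧ sN ≤ hi ∧
        (∀ i, sN ≤ i → i ≤ hi → f i = o) ∧
        (rest = [] → sN = lo) ∧ (rest ≠ [] → lo < sN ∧ Segsb f lo rest (sN - 1)) := by
      cases rest with
      | nil =>
        obtain ⟨hs, hlo, hcov⟩ := h
        exact ⟨lo, hs, le_rfl, hlo, hcov, fun _ => rfl, fun hne => absurd rfl hne⟩
      | cons p r =>
        obtain ⟨sN, hs, hlo, hhi, hcov, hrec⟩ := h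
        exact ⟨sN, hs, by omega, hhi, hcov, fun hh => by simp at hh,
          fun _ => ⟨hlo, hrec⟩⟩
    obtain ⟨sN, hs, hlosn, hsnhi, hcov, hnil, hcons⟩ := hstep
    subst hs
    rw [List.foldl_cons]
    have hcovg : ∀ i, sN ≤ i → i < hi + 1 → g i = PySem.Int.bor (f i) val := by
      intro i h1 h2
      exact hg i (by omega)
    by_cases hEq : PySem.Int.bor o val = oh
    · -- merge into the bottom segment of acc
      have hms : mergeStep val ((oh, ((hi + 1 : Nat) : Int)) :: t) (o, (sN : Int))
          = (oh, (sN : Int)) :: t := by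
        simp [mergeStep, hEq]
      rw [hms]
      have hext : Segsb g sN (((oh, (sN : Int)) :: t).reverse) E := by
        rw [List.reverse_cons]
        apply segsb_extend_last g t.reverse oh ((hi + 1 : Nat) : Int) E (hi + 1) sN
        · rw [← List.reverse_cons]; exact hacc
        · omega
        · intro i h1 h2
          rw [hcovg i h1 h2, hcov i h1 (by omega), hEq]
      cases rest with
      | nil =>
        rw [List.foldl_nil]
        have hl : sN = lo := hnil rfl
        subst hl
        exact hext
      | cons p r =>
        obtain ⟨hlo', hrec⟩ := hcons (by simp)
        have hsn1 : sN - 1 + 1 = sN := by omega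
        exact ih lo (sN - 1) _ hrec (by omega) (by rw [hsn1]; exact hext)
    · -- push a new bottom segment
      have hms : mergeStep val ((oh, ((hi + 1 : Nat) : Int)) :: t) (o, (sN : Int))
          = (PySem.Int.bor o val, (sN : Int)) :: (oh, ((hi + 1 : Nat) : Int)) :: t := by
        simp [mergeStep, hEq]
      rw [hms]
      have hext : Segsb g sN (((PySem.Int.bor o val, (sN : Int)) :: (oh, ((hi + 1 : Nat) : Int)) :: t).reverse) E := by
        rw [List.reverse_cons]
        apply segsb_append g ((oh, ((hi + 1 : Nat) : Int)) :: t).reverse (PySem.Int.bor o val) E (hi + 1) sN hacc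
        · omega
        · intro i h1 h2
          rw [hcovg i h1 h2, hcov i h1 (by omega)]
      cases rest with
      | nil =>
        rw [List.foldl_nil]
        have hl : sN = lo := hnil rfl
        subst hl
        exact hext
      | cons p r =>
        obtain ⟨hlo', hrec⟩ := hcons (by simp)
        have hsn1 : sN - 1 + 1 = sN := by omega
        exact ih lo (sN - 1) _ hrec (by omega) (by rw [hsn1]; exact hext)

theorem lp_step (nums : List Int) (m : Nat) (lp : PySem.Dict Int Int)
    (h : ∀ v, lp.get? v = lastOcc nums m v) :
    ∀ v, (lp.insert (pvA nums m) (m : Int)).get? v = lastOcc nums (m + 1) v := by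
  intro v
  rw [PySem.Dict.get?_insert]
  by_cases hv : v = pvA nums m
  · subst hv
    rw [if_pos rfl, lastOcc, if_pos rfl]
  · rw [if_neg hv, lastOcc, if_neg (fun hh => hv hh.symm)]
    exact h v

theorem AState_succ (nums : List Int) (m : Nat) :
    AState nums (m + 1) = stepA nums (AState nums m) (m : Int) := by
  unfold AState
  rw [show ((m + 1 : Nat) : Int) = (m : Int) + 1 by push_cast; ring,
    PySem.List.pyRange_one_succ_right (by positivity), List.foldl_append, List.foldl_cons,
    List.foldl_nil]

theorem invA (nums : List Int) : ∀ m : Nat,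
    (∀ v, (AState nums m).1.get? v = lastOcc nums m v) ∧
    (m = 0 → (AState nums m).2.1 = []) ∧
    (∀ m' : Nat, m = m' + 1 → Segsb (fAt nums m') 0 (AState nums m).2.1 m') ∧
    (AState nums m).2.2 = ((List.range m).map (fun e => (cntA nums e : Int))).sum := by
  intro m
  induction m with
  | zero =>
    have h0 : AState nums 0 = (PySem.Dict.empty, [], 0) := by
      unfold AState
      rw [show ((0 : Nat) : Int) = 0 by simp, PySem.List.pyRange_one_eq_nil le_rfl]
      rfl
    refine ⟨?_, fun _ => by rw [h0], fun m' hm => by omega, by rw [h0]; simp⟩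
    intro v
    rw [h0, lastOcc]
    exact PySem.Dict.get?_empty v
  | succ m ih =>
    obtain ⟨ihd, ihz, ihs, iht⟩ := ih
    rw [AState_succ]
    have hval : PySem.List.pyGetD nums (m : Int) 0 = pvA nums m := by
      rw [PySem.List.pyGetD_natCast]; rfl
    -- the new dp satisfies the segment invariant for endpoint m
    have hseg : Segsb (fAt nums m) 0
        (((AState nums m).2.1.foldl (mergeStep (pvA nums m)) [(pvA nums m, (m : Int))]).reverse) m := by
      have hsing : ∀ T : Nat, T = m →
          Segsb (fAt nums m) T ([(pvA nums m, (m : Int))].reverse) m := by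
        intro T hT
        refine ⟨by rw [hT], by omega, fun i h1 h2 => ?_⟩
        have hi2 : i = m := by omega
        subst hi2
        exact fAt_self nums i
      rcases Nat.eq_zero_or_pos m with hm | hm
      · subst hm
        rw [ihz rfl, List.foldl_nil]
        exact hsing 0 rfl
      · obtain ⟨m'', rfl⟩ : ∃ m'', m = m'' + 1 := ⟨m - 1, by omega⟩
        apply mergeFold (fAt nums m'') (fAt nums (m'' + 1)) (pvA nums (m'' + 1)) (m'' + 1)
          (fun i hi => by
            have := fAt_succ nums (m'' + 1) i (by omega)
            rwa [show m'' + 1 - 1 = m'' by omega] at this)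
          (AState nums (m'' + 1)).2.1 0 m'' [(pvA nums (m'' + 1), ((m'' + 1 : Nat) : Int))]
          (ihs m'' rfl) (by omega)
        exact hsing (m'' + 1) rfl
    refine ⟨?_, fun hh => by omega, ?_, ?_⟩
    · show ∀ v, ((AState nums m).1.insert (PySem.List.pyGetD nums (m : Int) 0) (m : Int)).get? v
          = lastOcc nums (m + 1) v
      rw [hval]
      exact lp_step nums m (AState nums m).1 ihd
    · intro m' hm'
      have : m' = m := by omega
      subst this
      show Segsb (fAt nums m') 0
        (((AState nums m').2.1.foldl (mergeStep (PySem.List.pyGetD nums (m' : Int) 0))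
          [(PySem.List.pyGetD nums (m' : Int) 0, (m' : Int))]).reverse) m'
      rw [hval]
      exact hseg
    · show countLoop ((AState nums m).1.insert (PySem.List.pyGetD nums (m : Int) 0) (m : Int))
          (((AState nums m).2.1.foldl (mergeStep (PySem.List.pyGetD nums (m : Int) 0))
            [(PySem.List.pyGetD nums (m : Int) 0, (m : Int))]).reverse) (m : Int) (AState nums m).2.2
          = ((List.range (m + 1)).map (fun e => (cntA nums e : Int))).sum
      rw [hval, countLoop_eq,
        segs_count nums _ m (lp_step nums m (AState nums m).1 ihd) _ 0 m hseg le_rfl, iht]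
      rw [List.range_succ, List.map_append, List.sum_append]
      simp only [List.map_cons, List.map_nil, List.sum_cons, List.sum_nil, add_zero]
      congr 1
      unfold cntA
      rw [List.range_eq_range']
      congr 1

theorem a_eq (nums : List Int) :
    countGoodSubarrays nums = ((List.range nums.length).map (fun e => (cntA nums e : Int))).sum := by
  rw [port_eq]
  exact (invA nums nums.length).2.2.2

-- ===== B side =====

theorem pyRangeNat (i n : Nat) :
    PySem.List.pyRange (i : Int) (n : Int) 1 = (List.range' i (n - i)).map (fun q : Nat => (q : Int)) := by
  apply List.ext_getElem
  · rw [PySem.List.length_pyRange_one]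
    simp only [List.length_map, List.length_range']
    omega
  · intro k h1 h2
    rw [PySem.List.getElem_pyRange_one]
    simp [List.getElem_range']

theorem contains_ofList (L : List Int) (x : Int) :
    PySem.Set.contains (PySem.Set.ofList L) x = decide (x ∈ L) := by
  simp [pysem]

theorem innerB_inv (nums : List Int) (i : Nat) : ∀ (k : Nat) (t0 : Int),
    ((List.range' i k).map (fun q : Nat => (q : Int))).foldl (stepBIn nums) (0, PySem.Set.empty, t0)
      = (orSeg nums i k, PySem.Set.ofList (elemsSeg nums i k),
          t0 + ((List.range k).countP (fun t => goodAt nums i (i + t)) : Int)) := by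
  intro k
  induction k with
  | zero =>
    intro t0
    show (0, PySem.Set.empty, t0) = _
    simp [orSeg, elemsSeg]
  | succ k ih =>
    intro t0
    rw [List.range'_1_concat, List.map_append, List.foldl_append, ih]
    simp only [List.map_cons, List.map_nil, List.foldl_cons, List.foldl_nil]
    have hval : PySem.List.pyGetD nums ((i + k : Nat) : Int) 0 = pvA nums (i + k) := by
      rw [PySem.List.pyGetD_natCast]; rfl
    unfold stepBIn
    simp only [hval]
    have hor : PySem.Int.bor (orSeg nums i k) (pvA nums (i + k)) = orSeg nums i (k + 1) :=
      (orSeg_concat nums i k).symm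
    have hseen : PySem.Set.add (PySem.Set.ofList (elemsSeg nums i k)) (pvA nums (i + k))
        = PySem.Set.ofList (elemsSeg nums i (k + 1)) := by
      rw [elemsSeg_concat, PySem.Set.ofList_append_singleton]
    rw [hor, hseen, contains_ofList]
    have hgood : decide (orSeg nums i (k + 1) ∈ elemsSeg nums i (k + 1)) = goodAt nums i (i + k) := by
      unfold goodAt
      rw [show i + k + 1 - i = k + 1 by omega]
    rw [hgood]
    congr 1
    congr 1
    rw [List.range_succ, List.countP_append, List.countP_cons, List.countP_nil]
    cases hg : goodAt nums i (i + k)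
    · simp
    · simp
      ring

theorem rowB_eq (nums : List Int) (n i : Nat) (t : Int) :
    rowB nums (n : Int) t (i : Int) = t + (cntB nums n i : Int) := by
  unfold rowB
  rw [pyRangeNat, innerB_inv]
  rfl

theorem alt_eq (nums : List Int) :
    countGoodSubarrays_alt nums =
      ((List.range nums.length).map (fun i => (cntB nums nums.length i : Int))).sum := by
  rw [port_eq_alt, PySem.List.pyRange_zero_nat, List.foldl_map]
  have aux : ∀ (l : List Nat) (t : Int),
      l.foldl (fun tot (k : Nat) => rowB nums (nums.length : Int) tot (k : Int)) t
        = t + (l.map (fun i => (cntB nums nums.length i : Int))).sum := by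
    intro l
    induction l with
    | nil => intro t; simp
    | cons a l ih =>
      intro t
      rw [List.foldl_cons, rowB_eq, ih]
      simp [add_assoc]
  rw [aux]
  simp

-- ===== the exchange of summation orders =====

theorem swap_sum (nums : List Int) (n : Nat) :
    ((List.range n).map (fun e => cntA nums e)).sum
      = ((List.range n).map (fun i => cntB nums n i)).sum := by
  have hconv : ∀ (g : Nat → Nat), ((List.range n).map g).sum = ∑ e ∈ Finset.range n, g e := by
    intro g
    exact (Nat.add_zero _).symm
  rw [hconv, hconv]
  have hA : ∀ e, e < n → cntA nums e
      = ∑ i ∈ Finset.range n, (if i ≤ e ∧ goodAt nums i e then 1 else 0) := by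
    intro e he
    unfold cntA
    rw [countP_range_eq]
    calc ∑ i ∈ Finset.range (e + 1), (if goodAt nums i e then 1 else 0)
        = ∑ i ∈ Finset.range (e + 1), (if i ≤ e ∧ goodAt nums i e then 1 else 0) := by
          apply Finset.sum_congr rfl
          intro i hi
          rw [Finset.mem_range] at hi
          have h1 : i ≤ e := by omega
          by_cases hg : goodAt nums i e <;> simp [hg, h1]
      _ = ∑ i ∈ Finset.range n, (if i ≤ e ∧ goodAt nums i e then 1 else 0) := by
          apply Finset.sum_subset (Finset.range_subset_range.mpr (by omega))
          intro x _ hx2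
          rw [Finset.mem_range] at hx2
          have hxe : ¬ x ≤ e := by omega
          simp [hxe]
  have hB : ∀ i, i < n → cntB nums n i
      = ∑ e ∈ Finset.range n, (if i ≤ e ∧ goodAt nums i e then 1 else 0) := by
    intro i hi
    unfold cntB
    rw [countP_range_eq]
    calc ∑ t ∈ Finset.range (n - i), (if goodAt nums i (i + t) then 1 else 0)
        = ∑ e ∈ Finset.Ico i n, (if goodAt nums i e then 1 else 0) :=
          (Finset.sum_Ico_eq_sum_range (fun e => if goodAt nums i e then 1 else 0) i n).symm
      _ = ∑ e ∈ Finset.Ico i n, (if i ≤ e ∧ goodAt nums i e then 1 else 0) := by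
          apply Finset.sum_congr rfl
          intro e he
          rw [Finset.mem_Ico] at he
          by_cases hg : goodAt nums i e <;> simp [hg, he.1]
      _ = ∑ e ∈ Finset.range n, (if i ≤ e ∧ goodAt nums i e then 1 else 0) := by
          rw [Finset.range_eq_Ico]
          apply Finset.sum_subset (Finset.Ico_subset_Ico (Nat.zero_le i) le_rfl)
          intro x hx1 hx2
          rw [Finset.mem_Ico] at hx1 hx2
          have hix : ¬ i ≤ x := by omega
          simp [hix]
  rw [Finset.sum_congr rfl (fun e he => hA e (Finset.mem_range.mp he)),
    Finset.sum_congr rfl (fun i hi => hB i (Finset.mem_range.mp hi)),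
    Finset.sum_comm]

-- ===== VERDICT (by name: the statement is the Claim_ definition above) =====
theorem countGoodSubarrays_spec : Claim_equal_countGoodSubarrays := by
  intro nums _
  unfold Spec_countGoodSubarrays
  rw [a_eq nums, alt_eq nums]
  have h1 : ∀ (f : Nat → Nat) (n : Nat),
      ((List.range n).map (fun e => (f e : Int))).sum = (((List.range n).map f).sum : Int) := by
    intro f n
    rw [Nat.cast_list_sum, List.map_map]
    rfl
  rw [h1, h1, swap_sum]
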